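-- pv_equiv track=rewrite | github.com/scrapinghub/webstruct | webstruct/grouping.py | default_clustering_score
-- ===== SOURCE A (Python) =====
-- import collections
--
-- def default_clustering_score(clusters, threshold, dont_penalize=None):
--     """
--     Heuristic scoring function for clusters:
--
--     - larger clusters get bigger scores;
--     - clusters that have multiple entities of the same tag are penalized
--       (unless the tag is in ``dont_penalize`` set);
--     - total score is computed as a sum of scores of all clusters.
--
--     ``dont_penalize`` is a set of tags for which duplicates
--     are not penalized. It is empty by default.
--     """
--
--     # XXX: Maybe penalize large thresholds?
--
--     dont_penalize = set(dont_penalize or set())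
--     score = 0
--     for cluster in clusters:
--         cnt = collections.Counter(tag for tokens, tag, dist in cluster)
--         cl_score = sum(v for k, v in cnt.items()
--                        if v == 1 or k in dont_penalize)
--         cl_score -= sum(v for k, v in cnt.items()
--                         if v != 1 and k not in dont_penalize)
--         cl_score -= 1
--         score += cl_score
--
--     return score
-- ===== SOURCE B (Python) =====
-- def default_clustering_score(clusters, threshold, dont_penalize=None):
--     dp = set(dont_penalize or ())
--     total = 0
--     for cluster in clusters:
--         tags = sorted(tag for _, tag, _ in cluster)
--         total -= 1
--         i, n = 0, len(tags)
--         while i < n: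
--             j = i + 1
--             while j < n and tags[j] == tags[i]:
--                 j += 1
--             run = j - i
--             total += run if run == 1 or tags[i] in dp else -run
--             i = j
--     return total
-- ===== Notes on version B (the rewrite author's own statement) =====
-- stated objective: alternative
-- what changed: B sorts each cluster's tags and scores run-lengths of equal tags in one scan over the sorted list (+run for unique or non-penalized runs, -run otherwise), replacing A's hash-based Counter and its two filtered sums over distinct-tag items with a sort-then-scan pass.
import Mathlib
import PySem

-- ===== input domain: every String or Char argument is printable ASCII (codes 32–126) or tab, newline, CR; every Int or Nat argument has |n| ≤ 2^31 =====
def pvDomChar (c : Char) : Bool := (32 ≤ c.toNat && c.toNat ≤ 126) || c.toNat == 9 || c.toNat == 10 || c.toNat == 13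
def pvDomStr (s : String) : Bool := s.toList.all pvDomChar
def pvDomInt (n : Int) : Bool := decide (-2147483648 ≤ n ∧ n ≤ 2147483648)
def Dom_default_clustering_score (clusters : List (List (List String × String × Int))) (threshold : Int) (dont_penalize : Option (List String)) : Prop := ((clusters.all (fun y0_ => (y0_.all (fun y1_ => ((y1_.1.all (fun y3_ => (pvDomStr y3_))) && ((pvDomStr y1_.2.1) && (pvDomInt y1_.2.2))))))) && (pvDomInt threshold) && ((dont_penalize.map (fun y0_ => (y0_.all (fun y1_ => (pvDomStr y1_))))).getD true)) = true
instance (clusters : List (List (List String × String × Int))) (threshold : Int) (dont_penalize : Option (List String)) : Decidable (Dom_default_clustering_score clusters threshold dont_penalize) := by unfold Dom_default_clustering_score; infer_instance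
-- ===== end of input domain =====

-- B sorts each cluster's tags and scores run-lengths of equal tags in one scan over the sorted list,
-- instead of A's Counter with two filtered sums over distinct-tag items (alternative algorithm, same values).

-- ===== PORT A =====
def default_clustering_score (clusters : List (List (List String × String × Int))) (threshold : Int) (dont_penalize : Option (List String)) : Int :=
  -- dont_penalize = set(dont_penalize or set())
  let dp : PySem.Set String := PySem.Set.ofList (dont_penalize.getD [])
  -- for cluster in clusters: … score += cl_score
  clusters.foldl (fun score cluster =>
    let cnt := PySem.Dict.counter (cluster.map (fun x => x.2.1))
    let cl_score := ((cnt.items.filter (fun kv => kv.2 == 1 || PySem.Set.contains dp kv.1)).map (fun kv => kv.2)).sum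
    let cl_score := cl_score - ((cnt.items.filter (fun kv => !(kv.2 == 1) && !(PySem.Set.contains dp kv.1))).map (fun kv => kv.2)).sum
    let cl_score := cl_score - 1
    score + cl_score) 0

-- ===== PORT B =====
-- the outer while over i: each step handles one run; the inner while over j is the takeWhile
def pvScanRuns (dp : PySem.Set String) : List String → Int → Int
  | [], total => total
  | a :: rest, total =>
      let run : Int := ((rest.takeWhile (fun t => t == a)).length : Int) + 1
      pvScanRuns dp (rest.dropWhile (fun t => t == a))
        (if run == 1 || PySem.Set.contains dp a then total + run else total - run)
termination_by l => l.length
decreasing_by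
  simpa using Nat.lt_succ_of_le (List.length_dropWhile_le _ _)

def default_clustering_score_alt (clusters : List (List (List String × String × Int))) (threshold : Int) (dont_penalize : Option (List String)) : Int :=
  -- dp = set(dont_penalize or ())
  let dp : PySem.Set String := PySem.Set.ofList (dont_penalize.getD [])
  clusters.foldl (fun total cluster =>
    let tags := PySem.List.sorted (cluster.map (fun x => x.2.1)) (fun t => t) false
    pvScanRuns dp tags (total - 1)) 0

-- ===== PRECONDITION & SPEC =====
def Spec_default_clustering_score (clusters : List (List (List String × String × Int))) (threshold : Int) (dont_penalize : Option (List String)) (out : Int) : Prop := out = default_clustering_score_alt clusters threshold dont_penalize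
instance (clusters : List (List (List String × String × Int))) (threshold : Int) (dont_penalize : Option (List String)) (out : Int) : Decidable (Spec_default_clustering_score clusters threshold dont_penalize out) := by unfold Spec_default_clustering_score; infer_instance

-- ===== CLAIM (what is proved, stated in full; the proofs are below) =====
def Claim_equal_default_clustering_score : Prop := ∀ (clusters : List (List (List String × String × Int))) (threshold : Int) (dont_penalize : Option (List String)), Dom_default_clustering_score clusters threshold dont_penalize → Spec_default_clustering_score clusters threshold dont_penalize (default_clustering_score clusters threshold dont_penalize)

-- ===== LEMMAS AND PROOFS =====

-- a signed ±1 sum over a list is countP p minus countP (not p)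
theorem signed_sum_eq {α : Type} (p : α → Bool) (l : List α) :
    (l.map (fun t => if p t then (1 : Int) else -1)).sum
      = (l.countP p : Int) - (l.countP (fun t => !p t) : Int) := by
  induction l with
  | nil => simp
  | cons a t ih =>
    simp only [List.map_cons, List.sum_cons, List.countP_cons, ih]
    cases p a <;> simp <;> ring

theorem cast_beq_one (n : Nat) : ((n : Int) == 1) = (n == 1) := by
  rcases eq_or_ne n 1 with h | h
  · simp [h]
  · have h2 : (n : Int) ≠ 1 := by exact_mod_cast h
    simp [h, h2]

-- per-cluster core: A's two filtered Counter sums equal the signed token sum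
theorem cluster_core (tags dp : List String) :
    (((PySem.Dict.counter tags).items.filter (fun kv => kv.2 == 1 || PySem.Set.contains (PySem.Set.ofList dp) kv.1)).map (fun kv => kv.2)).sum
      - (((PySem.Dict.counter tags).items.filter (fun kv => !(kv.2 == 1) && !(PySem.Set.contains (PySem.Set.ofList dp) kv.1))).map (fun kv => kv.2)).sum
    = (tags.map (fun t => if tags.count t == 1 || PySem.Set.contains (PySem.Set.ofList dp) t then (1 : Int) else -1)).sum := by
  set p : String → Bool := fun k => (tags.count k == 1 || PySem.Set.contains (PySem.Set.ofList dp) k) with hp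
  have hperm : (PySem.Set.ofList tags).Perm tags.dedup := by
    rw [List.perm_ext_iff_of_nodup (PySem.Set.nodup_ofList tags) tags.nodup_dedup]
    intro a; simp [PySem.Set.mem_ofList, List.mem_dedup]
  have hcast : ∀ (l : List String), (l.map (fun k => (tags.count k : Int))).sum = ((l.map (fun k => tags.count k)).sum : Int) := by
    intro l; rw [Nat.cast_list_sum, List.map_map]; rfl
  have hpos : (((PySem.Dict.counter tags).items.filter (fun kv => kv.2 == 1 || PySem.Set.contains (PySem.Set.ofList dp) kv.1)).map (fun kv => kv.2)).sum
      = (tags.countP p : Int) := by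
    rw [PySem.Dict.items_counter]
    rw [List.filter_map, List.map_map]
    have h1 : ((fun (kv : String × Int) => kv.2 == 1 || PySem.Set.contains (PySem.Set.ofList dp) kv.1) ∘ (fun k => (k, (tags.count k : Int)))) = p := by
      funext k
      show ((tags.count k : Int) == 1 || _) = _
      rw [cast_beq_one]
    rw [h1]
    rw [List.Perm.sum_eq (((hperm.filter p).map _))]
    show ((tags.dedup.filter p).map (fun k => (tags.count k : Int))).sum = _
    rw [hcast, List.sum_map_count_dedup_filter_eq_countP p tags]
  have hneg : (((PySem.Dict.counter tags).items.filter (fun kv => !(kv.2 == 1) && !(PySem.Set.contains (PySem.Set.ofList dp) kv.1))).map (fun kv => kv.2)).sum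
      = (tags.countP (fun t => !p t) : Int) := by
    rw [PySem.Dict.items_counter]
    rw [List.filter_map, List.map_map]
    have h1 : ((fun (kv : String × Int) => !(kv.2 == 1) && !(PySem.Set.contains (PySem.Set.ofList dp) kv.1)) ∘ (fun k => (k, (tags.count k : Int)))) = (fun t => !p t) := by
      funext k
      show (!((tags.count k : Int) == 1) && _) = _
      rw [cast_beq_one]
      simp [hp]
    rw [h1]
    rw [List.Perm.sum_eq (((hperm.filter _).map _))]
    show ((tags.dedup.filter (fun t => !p t)).map (fun k => (tags.count k : Int))).sum = _
    rw [hcast, List.sum_map_count_dedup_filter_eq_countP _ tags]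
  rw [hpos, hneg, ← signed_sum_eq p tags]

-- on a sorted list, the run scan adds exactly the signed token sum
theorem scanRuns_sorted (dp : PySem.Set String) :
    ∀ (n : Nat) (l : List String), l.length ≤ n → l.Pairwise (· ≤ ·) → ∀ t : Int,
      pvScanRuns dp l t
        = t + (l.map (fun x => if l.count x == 1 || PySem.Set.contains dp x then (1 : Int) else -1)).sum := by
  intro n
  induction n with
  | zero =>
    intro l hl _ t
    have : l = [] := List.eq_nil_of_length_eq_zero (Nat.le_zero.mp hl)
    subst this; simp [pvScanRuns]
  | succ n ih =>
    intro l hl hsorted t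
    match l with
    | [] => simp [pvScanRuns]
    | a :: rest =>
      set s := rest.takeWhile (fun t => t == a) with hs
      set r := rest.dropWhile (fun t => t == a) with hr
      have hsplit : rest = s ++ r := (List.takeWhile_append_dropWhile).symm
      have hsall : ∀ x ∈ s, x = a := by
        intro x hx
        have := List.mem_takeWhile_imp hx
        exact eq_of_beq this
      -- a does not occur in r
      have hanr : a ∉ r := by
        intro har
        match hhead : r with
        | [] => simp at har
        | h :: tr =>
          have hhne : ¬ (h == a) = true := by
            have := List.head?_dropWhile_not (fun t => t == a) rest
            rw [← hr] at this
            simpa using this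
          have hhne' : h ≠ a := fun he => hhne (by simp [he])
          have haler : ∀ x ∈ rest, a ≤ x := by
            intro x hx
            exact (List.pairwise_cons.mp hsorted).1 x hx
          have hah : a ≤ h := haler h (by rw [hsplit]; simp)
          have hrsorted : (h :: tr).Pairwise (fun x y : String => x ≤ y) := by
            rw [hr]
            exact ((List.pairwise_cons.mp hsorted).2.sublist (List.dropWhile_sublist _))
          rcases List.mem_cons.mp har with he | htr
          · exact hhne' he.symm
          · have hha : h ≤ a := (List.pairwise_cons.mp hrsorted).1 a htr
            exact hhne' (le_antisymm hha hah)
      have hcnt_a : (a :: rest).count a = s.length + 1 := by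
        rw [List.count_cons_self, hsplit, List.count_append]
        have h1 : s.count a = s.length := by
          rw [List.count_eq_length]
          intro x hx; exact ((hsall x hx) ▸ rfl : a = x)
        have h2 : r.count a = 0 := List.count_eq_zero.mpr hanr
        omega
      have hcnt_r : ∀ x ∈ r, (a :: rest).count x = r.count x := by
        intro x hx
        have hxa : x ≠ a := fun he => hanr (he ▸ hx)
        have h0 : (a :: rest).count x = rest.count x := by
          simp [List.count_cons]
          exact fun h => hxa h.symm
        have h1 : s.count x = 0 := by
          rw [List.count_eq_zero]
          intro hxs; exact hxa (hsall x hxs)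
        rw [h0, hsplit, List.count_append]
        omega
      have hrsorted : r.Pairwise (fun x y : String => x ≤ y) :=
        (List.pairwise_cons.mp hsorted).2.sublist (List.dropWhile_sublist _)
      have hrlen : r.length ≤ n := by
        have h1 : r.length ≤ rest.length := List.length_dropWhile_le _ _
        simp only [List.length_cons] at hl; omega
      -- unfold one step of the scan
      rw [pvScanRuns]
      rw [ih r hrlen hrsorted]
      -- compute the signed sum over a :: rest
      have hmapr : r.map (fun x => if r.count x == 1 || PySem.Set.contains dp x then (1 : Int) else -1)
          = r.map (fun x => if (a :: rest).count x == 1 || PySem.Set.contains dp x then (1 : Int) else -1) := by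
        apply List.map_congr_left
        intro x hx; rw [hcnt_r x hx]
      have hmaps : ∀ x ∈ a :: s,
          (if (a :: rest).count x == 1 || PySem.Set.contains dp x then (1 : Int) else -1)
            = (if s.length + 1 == 1 || PySem.Set.contains dp a then (1 : Int) else -1) := by
        intro x hx
        have hxa : x = a := by
          rcases List.mem_cons.mp hx with he | hxs
          · exact he
          · exact hsall x hxs
        rw [hxa, hcnt_a]
      have hsum_as : ((a :: s).map (fun x => if (a :: rest).count x == 1 || PySem.Set.contains dp x then (1 : Int) else -1)).sum
          = (s.length + 1) * (if s.length + 1 == 1 || PySem.Set.contains dp a then (1 : Int) else -1) := by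
        rw [List.map_congr_left hmaps]
        rw [List.map_const', List.sum_replicate, nsmul_eq_mul]
        push_cast [List.length_cons]
        ring
      have hdecomp : (a :: rest).map (fun x => if (a :: rest).count x == 1 || PySem.Set.contains dp x then (1 : Int) else -1)
          = ((a :: s).map (fun x => if (a :: rest).count x == 1 || PySem.Set.contains dp x then (1 : Int) else -1))
            ++ (r.map (fun x => if (a :: rest).count x == 1 || PySem.Set.contains dp x then (1 : Int) else -1)) := by
        rw [← List.map_append]
        congr 1
        rw [hsplit]; simp
      rw [hdecomp, List.sum_append, hmapr.symm, hsum_as]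
      -- arithmetic: matching the run-based if with the token-based value
      have hbeq : ((((s.length : Int) + 1) == 1) : Bool) = ((s.length + 1 == 1 : Bool)) := by
        rcases Nat.eq_zero_or_pos s.length with h0 | hpos
        · simp [h0]
        · have h1 : ((s.length : Int) + 1) ≠ 1 := by omega
          have h2 : s.length + 1 ≠ 1 := by omega
          rw [beq_eq_false_iff_ne.mpr h1, beq_eq_false_iff_ne.mpr h2]
      rw [← hs]
      simp only [hbeq]
      split_ifs with hc
      · push_cast; ring
      · push_cast; ring

-- ===== VERDICT (by name: the statement is the Claim_ definition above) =====
theorem default_clustering_score_spec : Claim_equal_default_clustering_score := by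
  intro clusters threshold dont_penalize _
  show _ = _
  unfold default_clustering_score default_clustering_score_alt
  simp only []
  congr 1
  funext acc cluster
  set tags := cluster.map (fun x => x.2.1) with htags
  set dp := PySem.Set.ofList (dont_penalize.getD []) with hdp
  set st := PySem.List.sorted tags (fun t => t) false with hst
  have hsorted : st.Pairwise (fun a b : String => a ≤ b) := by
    have h := PySem.List.sorted_pairwise tags (fun t => t)
    simpa using h
  have hperm : st.Perm tags := PySem.List.sorted_perm tags (fun t => t) false
  have hmap : st.map (fun x => if st.count x == 1 || PySem.Set.contains dp x then (1 : Int) else -1)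
      = st.map (fun x => if tags.count x == 1 || PySem.Set.contains dp x then (1 : Int) else -1) := by
    apply List.map_congr_left
    intro x _; rw [hperm.count_eq]
  have hrun := scanRuns_sorted dp st.length st (le_refl _) hsorted (acc - 1)
  rw [hrun, hmap, List.Perm.sum_eq (hperm.map _)]
  have h := cluster_core tags (dont_penalize.getD [])
  rw [← hdp] at h
  omega
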